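-- pv_equiv track=rewrite | github.com/cj-torres/complex_hierarchy | language_builders.py | make_dyck1_continuation
-- ===== SOURCE A (Python) =====
-- def make_dyck1_continuation(w):
--     cont = []
--     for i, c in enumerate(w):
--         a_count =  len(w[:i+1].replace("b",""))-1
--         b_count = len(w[:i+1].replace("a",""))-1
--         if a_count == b_count:
--             cont.append([1, 1, 0])
--         elif a_count > b_count:
--             cont.append([0, 1, 1])
--     return cont
-- ===== SOURCE B (Python) =====
-- def make_dyck1_continuation(w):
--     cont = []
--     d = 0  # running (#'a') - (#'b') in the prefix seen so far
--     for c in w: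
--         if c == 'a':
--             d += 1
--         elif c == 'b':
--             d -= 1
--         if d == 0:
--             cont.append([1, 1, 0])
--         elif d > 0:
--             cont.append([0, 1, 1])
--     return cont
-- ===== Notes on version B (the rewrite author's own statement) =====
-- stated objective: faster
-- what changed: Replaces A's per-position rebuild of the prefix w[:i+1] and two full str.replace scans (quadratic) by a single pass that keeps the running difference of open-vs-close counts and appends each label from its sign.
import Mathlib
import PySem

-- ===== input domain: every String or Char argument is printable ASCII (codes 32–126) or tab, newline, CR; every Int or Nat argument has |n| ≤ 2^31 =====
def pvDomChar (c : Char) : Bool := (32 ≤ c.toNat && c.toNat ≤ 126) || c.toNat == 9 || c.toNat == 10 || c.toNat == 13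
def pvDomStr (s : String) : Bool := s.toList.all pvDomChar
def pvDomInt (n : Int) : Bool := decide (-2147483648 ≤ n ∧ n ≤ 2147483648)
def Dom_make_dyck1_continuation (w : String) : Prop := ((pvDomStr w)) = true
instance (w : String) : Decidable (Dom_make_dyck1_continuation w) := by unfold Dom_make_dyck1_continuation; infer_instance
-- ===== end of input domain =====

-- B replaces A's per-position quadratic prefix re-scan (two str.replace over w[:i+1] at every i)
-- by one pass maintaining the running difference of open-vs-close counts; objective: faster (measured).

-- ===== PORT A =====
-- loop body of A: at enumerate index i, recompute both counts from the prefix w[:i+1]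
def dyck1ABody (w : String) (cont : List (List Int)) (ic : Int × Char) : List (List Int) :=
  let a_count : Int :=
    (PySem.Str.len (PySem.Str.replace (PySem.Str.slice w none (some (ic.1 + 1))) "b" "") : Int) - 1
  let b_count : Int :=
    (PySem.Str.len (PySem.Str.replace (PySem.Str.slice w none (some (ic.1 + 1))) "a" "") : Int) - 1
  if a_count = b_count then cont ++ [[1, 1, 0]]
  else if a_count > b_count then cont ++ [[0, 1, 1]]
  else cont

def make_dyck1_continuation (w : String) : List (List Int) :=
  (PySem.List.enumerate w.toList 0).foldl (dyck1ABody w) []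

-- ===== PORT B =====
-- loop body of B: state (d, cont), d = running #'a' - #'b'
def dyck1BBody (st : Int × List (List Int)) (c : Char) : Int × List (List Int) :=
  let d : Int := if c = 'a' then st.1 + 1 else if c = 'b' then st.1 - 1 else st.1
  if d = 0 then (d, st.2 ++ [[1, 1, 0]])
  else if d > 0 then (d, st.2 ++ [[0, 1, 1]])
  else (d, st.2)

def make_dyck1_continuation_alt (w : String) : List (List Int) :=
  (w.toList.foldl dyck1BBody (0, [])).2

-- ===== PRECONDITION & SPEC =====
def Spec_make_dyck1_continuation (w : String) (out : List (List Int)) : Prop := out = make_dyck1_continuation_alt w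
instance (w : String) (out : List (List Int)) : Decidable (Spec_make_dyck1_continuation w out) := by unfold Spec_make_dyck1_continuation; infer_instance

-- ===== CLAIM (what is proved, stated in full; the proofs are below) =====
def Claim_equal_make_dyck1_continuation : Prop := ∀ (w : String), Dom_make_dyck1_continuation w → Spec_make_dyck1_continuation w (make_dyck1_continuation w)

-- ===== LEMMAS AND PROOFS =====

-- replace s [c] "" deletes every occurrence of c, i.e. filters it out
lemma replace_go_single_del (c : Char) : ∀ (fuel : Nat) (l acc : List Char), l.length ≤ fuel →
    PySem.Chars.replace.go [c] [] fuel l acc = acc.reverse ++ l.filter (· ≠ c) := by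
  intro fuel
  induction fuel with
  | zero =>
    intro l acc h
    have : l = [] := List.eq_nil_of_length_eq_zero (Nat.le_zero.mp h)
    subst this; simp [PySem.Chars.replace.go]
  | succ n ih =>
    intro l acc h
    match l with
    | [] => simp [PySem.Chars.replace.go]
    | x :: t =>
      simp only [PySem.Chars.replace.go]
      by_cases hx : x = c
      · subst hx
        simp only [List.isPrefixOf, BEq.rfl, Bool.true_and, if_true]
        rw [show List.drop [x].length (x :: t) = t from rfl]
        rw [ih t _ (by simpa using Nat.le_of_succ_le_succ h)]
        simp
      · have hpre : ([c].isPrefixOf (x :: t)) = false := by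
          simp [List.isPrefixOf]
          exact fun h => hx h.symm
        rw [hpre]
        simp only [Bool.false_eq_true, if_false]
        rw [ih t _ (by simpa using Nat.le_of_succ_le_succ h)]
        simp only [List.filter_cons]
        have : (decide (x ≠ c)) = true := by simp [hx]
        simp [this]

lemma replace_single_del (c : Char) (s : List Char) :
    PySem.Chars.replace s [c] [] = s.filter (· ≠ c) := by
  rw [PySem.Chars.replace]
  simp only [List.isEmpty_cons, Bool.false_eq_true, if_false]
  exact replace_go_single_del c s.length s [] le_rfl

-- length of the filtered prefix, as count arithmetic
lemma length_filter_ne (c : Char) (s : List Char) :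
    (s.filter (· ≠ c)).length + s.count c = s.length := by
  induction s with
  | nil => simp
  | cons x t ih =>
    by_cases hx : x = c <;>
      simp [hx] at ih ⊢ <;> omega

set_option maxHeartbeats 1000000 in
-- the invariant: A's remaining loop over 'enumerate suf (pre.length)' inside w = pre ++ suf
-- equals B's fold over suf started at d = #'a'(pre) - #'b'(pre)
lemma dyck1_invariant (w : String) : ∀ (suf pre : List Char) (cont : List (List Int)),
    w.toList = pre ++ suf →
    (PySem.List.enumerate suf ((pre.length : Int))).foldl (dyck1ABody w) cont
      = (suf.foldl dyck1BBody (((pre.count 'a' : Int) - (pre.count 'b' : Int)), cont)).2 := by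
  intro suf
  induction suf with
  | nil => intro pre cont hw; simp [PySem.List.enumerate_nil]
  | cons x t ih =>
    intro pre cont hw
    rw [PySem.List.enumerate_cons, List.foldl_cons, List.foldl_cons]
    have hslice : PySem.Str.slice w none (some ((pre.length : Int) + 1)) =
        String.ofList (pre ++ [x]) := by
      have hc : ((pre.length : Int) + 1) = ((pre.length + 1 : Nat) : Int) := by push_cast; ring
      rw [PySem.Str.slice, hc]
      congr 1
      simp only [PySem.Chars.slice_eq_listSlice]
      rw [PySem.List.slice_to_natCast, hw,
          show pre ++ x :: t = (pre ++ [x]) ++ t by simp,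
          List.take_left' (by simp)]
    have hbody : dyck1ABody w cont ((pre.length : Int), x)
        = (dyck1BBody (((pre.count 'a' : Int) - (pre.count 'b' : Int)), cont) x).2 := by
      simp only [dyck1ABody, dyck1BBody, hslice]
      rw [PySem.Str.replace, PySem.Str.replace, PySem.Str.len_eq, PySem.Str.len_eq]
      simp only [String.toList_ofList]
      rw [show ("b" : String).toList = ['b'] from rfl, show ("a" : String).toList = ['a'] from rfl,
          show ("" : String).toList = ([] : List Char) from rfl]
      rw [replace_single_del, replace_single_del]
      have h1 := length_filter_ne 'b' (pre ++ [x])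
      have h2 := length_filter_ne 'a' (pre ++ [x])
      by_cases hxa : x = 'a' <;> by_cases hxb : x = 'b'
      · exact absurd (hxa.symm.trans hxb) (by decide)
      · subst hxa
        simp [List.count_append] at h1 h2 ⊢
        split_ifs <;> simp_all <;> omega
      · subst hxb
        simp [List.count_append] at h1 h2 ⊢
        split_ifs <;> simp_all <;> omega
      · simp [List.count_append, hxa, hxb] at h1 h2 ⊢
        split_ifs <;> simp_all <;> omega
    have hd : (dyck1BBody (((pre.count 'a' : Int) - (pre.count 'b' : Int)), cont) x).1
        = (((pre ++ [x]).count 'a' : Int) - ((pre ++ [x]).count 'b' : Int)) := by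
      simp only [dyck1BBody]
      by_cases hxa : x = 'a' <;> by_cases hxb : x = 'b' <;>
        simp [List.count_append, hxa, hxb] <;> split_ifs <;> simp_all <;> omega
    have hlen : ((pre.length : Int) + 1) = (((pre ++ [x]).length : Nat) : Int) := by
      simp
    rw [hbody]
    rw [hlen]
    rw [ih (pre ++ [x]) _ (by simp [hw])]
    have hpair : dyck1BBody (((pre.count 'a' : Int) - (pre.count 'b' : Int)), cont) x
        = ((((pre ++ [x]).count 'a' : Int) - ((pre ++ [x]).count 'b' : Int)),
           (dyck1BBody (((pre.count 'a' : Int) - (pre.count 'b' : Int)), cont) x).2) :=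
      Prod.ext hd rfl
    rw [← hpair]

-- ===== VERDICT (by name: the statement is the Claim_ definition above) =====
theorem make_dyck1_continuation_spec : Claim_equal_make_dyck1_continuation := by
  intro w _
  unfold Spec_make_dyck1_continuation make_dyck1_continuation make_dyck1_continuation_alt
  have h0 := dyck1_invariant w w.toList [] [] (by simp)
  norm_num at h0
  exact h0
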